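-- pv_equiv track=rewrite | github.com/openstack/manila | manila/db/sqlalchemy/api.py | _extract_subdict_by_fields
-- ===== SOURCE A (Python) =====
-- import copy
--
-- def _extract_subdict_by_fields(source_dict, fields):
--     dict_to_extract_from = copy.deepcopy(source_dict)
--     sub_dict = {}
--     for field in fields:
--         field_value = dict_to_extract_from.pop(field, None)
--         if field_value:
--             sub_dict.update({field: field_value})
--
--     return sub_dict, dict_to_extract_from
-- ===== SOURCE B (Python) =====
-- import copy
--
--
-- def _extract_subdict_by_fields(source_dict, fields):
--     copied = copy.deepcopy(source_dict)
--     fset = set(fields)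
--     sub_dict = {f: copied[f] for f in fields if f in copied and copied[f]}
--     remainder = {k: v for k, v in copied.items() if k not in fset}
--     return sub_dict, remainder
-- ===== Notes on version B (the rewrite author's own statement) =====
-- stated objective: simpler
-- what changed: B builds both result dicts directly by comprehension (requested truthy fields looked up in the untouched copy; remainder filtered against a set of the requested field names) instead of destructively popping fields off a copy one by one.
import Mathlib
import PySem

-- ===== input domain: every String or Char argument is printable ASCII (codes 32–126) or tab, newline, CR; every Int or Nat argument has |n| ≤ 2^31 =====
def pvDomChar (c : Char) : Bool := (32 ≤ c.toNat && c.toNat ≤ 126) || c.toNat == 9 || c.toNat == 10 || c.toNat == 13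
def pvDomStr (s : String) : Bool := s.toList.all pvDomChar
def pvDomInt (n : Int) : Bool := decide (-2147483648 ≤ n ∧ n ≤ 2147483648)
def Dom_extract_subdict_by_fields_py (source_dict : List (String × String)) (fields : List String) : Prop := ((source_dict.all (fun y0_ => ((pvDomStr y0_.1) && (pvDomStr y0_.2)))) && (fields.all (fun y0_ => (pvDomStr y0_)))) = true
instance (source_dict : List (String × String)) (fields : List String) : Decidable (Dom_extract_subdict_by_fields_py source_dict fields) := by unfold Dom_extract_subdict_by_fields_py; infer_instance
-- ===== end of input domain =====

-- B builds both result dicts directly (sub by lookups in the untouched copy, remainder by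
-- filtering against the set of field names) instead of destructively popping fields off a copy.

-- ===== PORT A =====
-- for field in fields: field_value = dict_to_extract_from.pop(field, None); if field_value: sub_dict.update({field: field_value})
def extract_subdict_by_fields_py (source_dict : List (String × String)) (fields : List String) : (List (String × String)) × (List (String × String)) :=
  let dict_to_extract_from : PySem.Dict String String := PySem.Dict.ofList source_dict
  let st := fields.foldl
    (fun (st : PySem.Dict String String × PySem.Dict String String) field =>
      match PySem.Dict.pop? st.2 field with
      | none => st                      -- pop(field, None) returned None (falsy): dict unchanged, nothing added
      | some (v, d) =>                  -- field was present and removed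
        if v ≠ "" then (st.1.insert field v, d) else (st.1, d))
    (PySem.Dict.empty, dict_to_extract_from)
  (st.1.items, st.2.items)

-- ===== PORT B =====
-- sub_dict = {f: copied[f] for f in fields if f in copied and copied[f]};
-- remainder = {k: v for k, v in copied.items() if k not in fset}
def extract_subdict_by_fields_py_alt (source_dict : List (String × String)) (fields : List String) : (List (String × String)) × (List (String × String)) :=
  let copied : PySem.Dict String String := PySem.Dict.ofList source_dict
  let fset : PySem.Set String := PySem.Set.ofList fields
  let sub_dict := fields.foldl
    (fun (acc : PySem.Dict String String) f =>
      match copied.get? f with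
      | some v => if v ≠ "" then acc.insert f v else acc
      | none => acc)
    PySem.Dict.empty
  (sub_dict.items, copied.items.filter (fun kv => !(PySem.Set.contains fset kv.1)))

-- ===== PRECONDITION & SPEC =====
def Spec_extract_subdict_by_fields_py (source_dict : List (String × String)) (fields : List String) (out : (List (String × String)) × (List (String × String))) : Prop := out = extract_subdict_by_fields_py_alt source_dict fields
instance (source_dict : List (String × String)) (fields : List String) (out : (List (String × String)) × (List (String × String))) : Decidable (Spec_extract_subdict_by_fields_py source_dict fields out) := by unfold Spec_extract_subdict_by_fields_py; infer_instance

-- ===== CLAIM (what is proved, stated in full; the proofs are below) =====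
def Claim_equal_extract_subdict_by_fields_py : Prop := ∀ (source_dict : List (String × String)) (fields : List String), Dom_extract_subdict_by_fields_py source_dict fields → Spec_extract_subdict_by_fields_py source_dict fields (extract_subdict_by_fields_py source_dict fields)

-- ===== LEMMAS AND PROOFS =====

-- get? after erase: the erased key is gone, every other key is untouched
theorem pv_get?_erase_self (d : PySem.Dict String String) (k : String) :
    (d.erase k).get? k = none := by
  simp only [PySem.Dict.erase, PySem.Dict.get?, Option.map_eq_none_iff, List.find?_eq_none]
  intro p hp
  simp only [List.mem_filter] at hp
  simpa using hp.2

theorem pv_get?_erase_ne (d : PySem.Dict String String) {k k' : String} (h : k' ≠ k) :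
    (d.erase k).get? k' = d.get? k' := by
  simp only [PySem.Dict.erase, PySem.Dict.get?]
  congr 1
  have hkk' : (k == k') = false := by simp [Ne.symm h]
  induction d.items with
  | nil => rfl
  | cons p rest ih =>
    by_cases hpk : p.1 = k
    · simp [hpk, hkk', ih]
    · by_cases hpk' : p.1 = k'
      · simp [hpk', h]
      · simp [hpk, hpk', ih]

-- if get? d f = none then no item of d has key f
theorem pv_get?_eq_none_key (d : PySem.Dict String String) (f : String)
    (h : d.get? f = none) : ∀ p ∈ d.items, p.1 ≠ f := by
  intro p hp hpf
  simp only [PySem.Dict.get?, Option.map_eq_none_iff, List.find?_eq_none] at h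
  have := h p hp
  simp [hpf] at this

-- overwriting the (unique, keys nodup) item holding (k, v) with (k, v) is the identity
theorem pv_map_insert_id (l : List (String × String)) (k v : String)
    (hnd : (l.map Prod.fst).Nodup) (hmem : (k, v) ∈ l) :
    l.map (fun p => if (p.1 == k) = true then (k, v) else p) = l := by
  induction l with
  | nil => rfl
  | cons p rest ih =>
    rw [List.map_cons] at hnd
    rcases List.nodup_cons.mp hnd with ⟨hnd1, hnd2⟩
    rcases List.mem_cons.mp hmem with hkv | hkv
    · subst hkv
      simp only [List.map_cons]
      rw [if_pos (by simp)]
      have hid : ∀ q ∈ rest, (if (q.1 == k) = true then ((k, v) : String × String) else q) = q := by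
        intro q hq
        have hqk : q.1 ≠ k := fun e => hnd1 (List.mem_map.mpr ⟨q, hq, e⟩)
        simp [hqk]
      have h2 := List.map_congr_left (l := rest) hid
      refine congrArg (List.cons (k, v)) ?_
      simpa using h2
    · have hk : k ∈ rest.map Prod.fst := List.mem_map.mpr ⟨(k, v), hkv, rfl⟩
      have hpk : p.1 ≠ k := fun e => hnd1 (by rw [e]; exact hk)
      simp only [List.map_cons]
      rw [if_neg (by simp [hpk])]
      exact congrArg (List.cons p) (ih hnd2 hkv)

-- re-inserting a key with the value it already has is a no-op (keys nodup)
theorem pv_insert_self (d : PySem.Dict String String) (k v : String)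
    (hnd : d.keys.Nodup) (h : d.get? k = some v) : d.insert k v = d := by
  apply PySem.Dict.ext
  have hc : d.contains k = true := by
    rw [PySem.Dict.contains_eq_isSome_get?, h]; rfl
  rw [PySem.Dict.items_insert_of_contains d v hc]
  exact pv_map_insert_id d.items k v hnd
    ((PySem.Dict.get?_eq_some_iff_mem_items d k v hnd).mp h)

-- the invariant tying A's shrinking dict to B's fixed copy
def pvInv (c sub dA : PySem.Dict String String) : Prop :=
  ∀ k, dA.get? k = c.get? k ∨
    (dA.get? k = none ∧ ∀ v, c.get? k = some v → v ≠ "" → sub.get? k = some v)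

-- the sub-dict sides of the two folds agree under the invariant
theorem pv_sub_eq (c : PySem.Dict String String) (fields : List String) :
    ∀ (sub dA : PySem.Dict String String), sub.keys.Nodup → pvInv c sub dA →
    (fields.foldl
      (fun (st : PySem.Dict String String × PySem.Dict String String) field =>
        match PySem.Dict.pop? st.2 field with
        | none => st
        | some (v, d) => if v ≠ "" then (st.1.insert field v, d) else (st.1, d))
      (sub, dA)).1
    = fields.foldl
      (fun (acc : PySem.Dict String String) f =>
        match c.get? f with
        | some v => if v ≠ "" then acc.insert f v else acc
        | none => acc) sub := by
  induction fields with
  | nil => intro sub dA _ _; rfl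
  | cons f fs ih =>
    intro sub dA hnd hinv
    simp only [List.foldl_cons]
    rcases hA : dA.get? f with _ | w
    · -- A: pop misses, state unchanged
      have hstep : PySem.Dict.pop? dA f = none := by simp [PySem.Dict.pop?, hA]
      simp only [hstep]
      rcases hc : c.get? f with _ | v
      · exact ih sub dA hnd hinv
      · by_cases hv : v = ""
        · simp only [hv, ne_eq, not_true_eq_false, if_false]
          exact ih sub dA hnd hinv
        · -- B re-inserts a value sub already holds: no-op
          have hsub : sub.get? f = some v := by
            rcases hinv f with h1 | h2
            · rw [hA] at h1; rw [hc] at h1; cases h1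
            · exact h2.2 v hc hv
          simp only [hv, ne_eq, not_false_eq_true, if_true,
            pv_insert_self sub f v hnd hsub]
          exact ih sub dA hnd hinv
    · -- A: pop hits with value w
      have hstep : PySem.Dict.pop? dA f = some (w, dA.erase f) := by
        simp [PySem.Dict.pop?, hA]
      have hc : c.get? f = some w := by
        rcases hinv f with h1 | h2
        · rw [← h1, hA]
        · rw [h2.1] at hA; cases hA
      simp only [hstep, hc]
      by_cases hw : w = ""
      · simp only [hw, ne_eq, not_true_eq_false, if_false]
        refine ih sub (dA.erase f) hnd ?_
        intro k
        by_cases hk : k = f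
        · subst hk
          refine Or.inr ⟨pv_get?_erase_self dA k, fun v hv hne => ?_⟩
          rw [hc] at hv; cases hv
          exact absurd hw hne
        · rw [pv_get?_erase_ne dA hk]
          exact hinv k
      · simp only [hw, ne_eq, not_false_eq_true, if_true]
        refine ih (sub.insert f w) (dA.erase f)
          (PySem.Dict.nodup_keys_insert sub f w hnd) ?_
        intro k
        by_cases hk : k = f
        · subst hk
          refine Or.inr ⟨pv_get?_erase_self dA k, fun v hv _ => ?_⟩
          rw [hc] at hv; cases hv
          exact PySem.Dict.get?_insert_self sub k w
        · rw [pv_get?_erase_ne dA hk]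
          rcases hinv k with h1 | h2
          · exact Or.inl h1
          · exact Or.inr ⟨h2.1, fun v hv hne => by
              rw [PySem.Dict.get?_insert_of_ne sub w hk]; exact h2.2 v hv hne⟩

-- the remainder side of A's fold: erase-by-erase equals one filter against the field list
theorem pv_rem_eq (fields : List String) :
    ∀ (sub dA : PySem.Dict String String),
    ((fields.foldl
      (fun (st : PySem.Dict String String × PySem.Dict String String) field =>
        match PySem.Dict.pop? st.2 field with
        | none => st
        | some (v, d) => if v ≠ "" then (st.1.insert field v, d) else (st.1, d))
      (sub, dA)).2).items
    = dA.items.filter (fun kv => !(fields.contains kv.1)) := by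
  induction fields with
  | nil => intro sub dA; simp
  | cons f fs ih =>
    intro sub dA
    simp only [List.foldl_cons]
    rcases hA : dA.get? f with _ | w
    · have hstep : PySem.Dict.pop? dA f = none := by simp [PySem.Dict.pop?, hA]
      simp only [hstep, ih]
      refine List.filter_congr ?_
      intro kv hkv
      have hne : kv.1 ≠ f := pv_get?_eq_none_key dA f hA kv hkv
      simp [hne]
    · have hstep : PySem.Dict.pop? dA f = some (w, dA.erase f) := by
        simp [PySem.Dict.pop?, hA]
      have herase : ∀ sub' : PySem.Dict String String, ((fs.foldl
          (fun (st : PySem.Dict String String × PySem.Dict String String) field =>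
            match PySem.Dict.pop? st.2 field with
            | none => st
            | some (v, d) => if v ≠ "" then (st.1.insert field v, d) else (st.1, d))
          (sub', dA.erase f)).2).items
          = dA.items.filter (fun kv => !((f :: fs).contains kv.1)) := by
        intro sub'
        rw [ih sub' (dA.erase f)]
        simp only [PySem.Dict.erase, List.filter_filter]
        refine List.filter_congr ?_
        intro kv _
        by_cases hkf : kv.1 = f
        · simp [hkf]
        · simp [hkf]
      by_cases hw : w = ""
      · simp only [hstep, hw, ne_eq, not_true_eq_false, if_false]
        exact herase sub
      · simp only [hstep, hw, ne_eq, not_false_eq_true, if_true]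
        exact herase (sub.insert f w)

-- ===== VERDICT (by name: the statement is the Claim_ definition above) =====
theorem extract_subdict_by_fields_py_spec : Claim_equal_extract_subdict_by_fields_py := by
  intro source_dict fields _
  unfold Spec_extract_subdict_by_fields_py
  unfold extract_subdict_by_fields_py extract_subdict_by_fields_py_alt
  refine Prod.ext ?_ ?_
  · exact congrArg PySem.Dict.items
      (pv_sub_eq (PySem.Dict.ofList source_dict) fields
        PySem.Dict.empty (PySem.Dict.ofList source_dict)
        PySem.Dict.nodup_keys_empty (fun _ => Or.inl rfl))
  · refine Eq.trans (pv_rem_eq fields PySem.Dict.empty (PySem.Dict.ofList source_dict)) ?_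
    refine List.filter_congr ?_
    intro kv _
    simp
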